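-- pv_equiv track=rewrite | github.com/Arpit01Goel/CPP | 5Dec23/Yetkeyboard.py | f
-- ===== SOURCE A (Python) =====
-- def f(s):
--     ans = ""
--     cap = 0
--     small = 0
--     index_cap=[]
--     index_small=[]
--     # iterate the string s
--     for i in range(len(s)):
--         if s[i] == 'b':
--             if small != 0:
--                 # remove the last lowercase letter of the string ans . if no lowercase, just pass
--                 for j in range(len(ans) - 1, -1, -1):
--                     if 'a' <= ans[j] <= 'z':
--                         ans = ans[:j] + ans[j+1:]
--                         # decrease small
--                         small -= 1
--                         #now if any index in index_small is greater than j, decrease it by 1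
--
--                         #start from the last index of index_small . if index comes out to be less than j , break
--                         for k in range(len(index_small)-1,-1,-1):
--                             if index_small[k]>j:
--                                 index_small[k]-=1
--                             else:
--                                 break
--                         #remove the last index from index_small
--                         del index_small[-1]
--
--                         #now if any index in index_cap is greater than j, decrease it by 1
--
--                         #start from the last index of index_cap . if index comes out to be less than j , break
--                         for k in range(len(index_cap)-1,-1,-1):
--                             if index_cap[k]>j:
--                                 index_cap[k]-=1
--                             else:
--                                 break
--                         #remove the last index from index_cap
--                         del index_cap[-1]
--
--
--                         break
--         elif s[i] == 'B':
--             if cap != 0: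
--                 # remove the last uppercase letter of the string ans . if no uppercase, just pass
--                 for j in range(len(ans) - 1, -1, -1):
--                     if 'A' <= ans[j] <= 'Z':
--                         ans = ans[:j] + ans[j+1:]
--                         # decrease cap
--                         cap -= 1
--                         break
--         else:
--             ans += s[i]
--             # if the letter is uppercase, increase cap
--             if 'A' <= s[i] <= 'Z':
--                 cap += 1
--                 #add the index in index_cap
--                 index_cap.append(i)
--
--             # if the letter is lowercase, increase small
--             if 'a' <= s[i] <= 'z':
--                 small += 1
--                 #add the index in index_small
--                 index_small.append(i)
--
--     return ans
-- ===== SOURCE B (Python) =====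
-- def f(s):
--     # One right-to-left pass: count pending 'b'/'B' backspaces and drop the
--     # lowercase/uppercase letters they consume; O(n) vs A's repeated rescans.
--     pl = pu = 0
--     rev = []
--     for c in reversed(s):
--         if c == 'b':
--             pl += 1
--         elif c == 'B':
--             pu += 1
--         elif 'a' <= c <= 'z' and pl:
--             pl -= 1
--         elif 'A' <= c <= 'Z' and pu:
--             pu -= 1
--         else:
--             rev.append(c)
--     return ''.join(reversed(rev))
-- ===== Notes on version B (the rewrite author's own statement) =====
-- stated objective: faster
-- what changed: Replaced the left-to-right simulation (which rescans the built string for the last lowercase/uppercase letter at every 'b'/'B' and maintains quadratic index-list fixups) by a single right-to-left pass carrying two pending-backspace counters, so each character is touched once; Pre_ excludes exactly the inputs where A raises IndexError (del index_cap[-1] on an empty list).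
import Mathlib
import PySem

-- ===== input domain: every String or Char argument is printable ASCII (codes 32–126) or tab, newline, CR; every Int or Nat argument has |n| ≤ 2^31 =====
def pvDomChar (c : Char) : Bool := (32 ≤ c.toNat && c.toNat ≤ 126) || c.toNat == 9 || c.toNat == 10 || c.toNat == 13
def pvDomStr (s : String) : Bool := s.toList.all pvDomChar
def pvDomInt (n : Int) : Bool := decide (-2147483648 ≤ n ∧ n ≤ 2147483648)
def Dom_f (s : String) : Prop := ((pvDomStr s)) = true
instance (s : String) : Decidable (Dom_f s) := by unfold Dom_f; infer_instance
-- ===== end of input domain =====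

-- B replaces A's quadratic left-to-right simulation (rescanning the built string at every
-- 'b'/'B') by a single right-to-left pass with two pending-backspace counters; O(n).

-- ===== PORT A =====
def pvIsLower (c : Char) : Bool := 'a' ≤ c && c ≤ 'z'
def pvIsUpper (c : Char) : Bool := 'A' ≤ c && c ≤ 'Z'

structure StA where
  ans : List Char
  cap : Int
  small : Int
  icap : List Int
  ismall : List Int

-- A's inner j-loop "for j in range(len(ans)-1,-1,-1): if p(ans[j]): remove ans[j]; break",
-- run over ans.reverse (same scan from the last index down), carrying the Python index j;
-- returns (new ans, reversed; the j found) or none when the loop falls through.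
def pvScanRemove (p : Char → Bool) : List Char → Int → Option (List Char × Int)
  | [], _ => none
  | a :: t, j =>
    if p a then some (t, j)
    else match pvScanRemove p t (j - 1) with
      | none => none
      | some (t', j') => some (a :: t', j')

-- A's k-loop "for k in range(len(lst)-1,-1,-1): if lst[k]>j: lst[k]-=1 else break",
-- run over lst.reverse (same scan from the last index down).
def pvAdjustRev : List Int → Int → List Int
  | [], _ => []
  | x :: t, j => if x > j then (x - 1) :: pvAdjustRev t j else x :: t

def pvAdjust (l : List Int) (j : Int) : List Int := (pvAdjustRev l.reverse j).reverse

def pvStepA (st : StA) (i : Int) (c : Char) : StA :=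
  if c = 'b' then
    if st.small ≠ 0 then
      match pvScanRemove pvIsLower st.ans.reverse (st.ans.length - 1) with
      | none => st
      | some (r', j) =>
        { st with ans := r'.reverse, small := st.small - 1,
                  ismall := (pvAdjust st.ismall j).dropLast,   -- del ismall[-1] (raises on []; Pre_f excludes)
                  icap := (pvAdjust st.icap j).dropLast }      -- del icap[-1] (raises on []; Pre_f excludes)
    else st
  else if c = 'B' then
    if st.cap ≠ 0 then
      match pvScanRemove pvIsUpper st.ans.reverse (st.ans.length - 1) with
      | none => st
      | some (r', _) => { st with ans := r'.reverse, cap := st.cap - 1 }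
    else st
  else
    { ans := st.ans ++ [c],
      cap := st.cap + (if pvIsUpper c then 1 else 0),
      small := st.small + (if pvIsLower c then 1 else 0),
      icap := st.icap ++ (if pvIsUpper c then [i] else []),
      ismall := st.ismall ++ (if pvIsLower c then [i] else []) }

def f (s : String) : String :=
  String.ofList ((s.toList.foldl (fun (p : Int × StA) c => (p.1 + 1, pvStepA p.2 p.1 c))
      (0, ⟨[], 0, 0, [], []⟩)).2.ans)

-- ===== PORT B =====
-- one pass over reversed(s): pl/pu count pending 'b'/'B' backspaces, survivors are consed
-- in reverse order and reversed at the end (Source B's rev list + final join(reversed(rev))).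
def pvRunB : List Char → Nat → Nat → List Char
  | [], _, _ => []
  | c :: t, pl, pu =>
    if c = 'b' then pvRunB t (pl + 1) pu
    else if c = 'B' then pvRunB t pl (pu + 1)
    else if pvIsLower c && decide (0 < pl) then pvRunB t (pl - 1) pu
    else if pvIsUpper c && decide (0 < pu) then pvRunB t pl (pu - 1)
    else c :: pvRunB t pl pu

def f_alt (s : String) : String := String.ofList ((pvRunB s.toList.reverse 0 0).reverse)

-- ===== PRECONDITION & SPEC =====
-- Python A raises IndexError (del index_cap[-1] on an empty list) whenever some 'b' deletes a
-- lowercase letter at a point where every uppercase letter appended so far has already been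
-- matched by an earlier 'b'-deletion; Pre_f excludes exactly those inputs via a simple
-- counting scan (low/up = appended lower/upper letters so far, d = successful 'b'-deletions).
def pvPreScan : List Char → Int → Int → Int → Bool
  | [], _, _, _ => true
  | c :: t, low, up, d =>
    if c = 'b' then
      if low > d then (if up > d then pvPreScan t low up (d + 1) else false)
      else pvPreScan t low up d
    else if c = 'B' then pvPreScan t low up d
    else pvPreScan t (low + (if pvIsLower c then 1 else 0)) (up + (if pvIsUpper c then 1 else 0)) d

def Pre_f (s : String) : Prop := pvPreScan s.toList 0 0 0 = true
instance (s : String) : Decidable (Pre_f s) := by unfold Pre_f; infer_instance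

def pvWitness_f : String := "aXbB c."

def Spec_f (s : String) (out : String) : Prop := out = f_alt s
instance (s : String) (out : String) : Decidable (Spec_f s out) := by unfold Spec_f; infer_instance

-- ===== CLAIM (what is proved, stated in full; the proofs are below) =====
def Claim_equal_f : Prop := ∀ (s : String), Dom_f s → Pre_f s → Spec_f s (f s)
-- ===== LEMMAS AND PROOFS =====

-- reference model, on the REVERSED answer list: remF p removes the first p-element
def remF (p : Char → Bool) : List Char → List Char
  | [] => []
  | a :: t => if p a then t else a :: remF p t

def stepR (r : List Char) (c : Char) : List Char :=
  if c = 'b' then remF pvIsLower r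
  else if c = 'B' then remF pvIsUpper r
  else c :: r

lemma lower_not_upper {c : Char} (h : pvIsLower c = true) : pvIsUpper c = false := by
  simp only [pvIsLower, Bool.and_eq_true, decide_eq_true_eq] at h
  simp only [pvIsUpper, Bool.and_eq_false_iff, decide_eq_false_iff_not]
  right
  intro h2
  obtain ⟨ha, _⟩ := h
  simp only [Char.le_def, UInt32.le_iff_toNat_le] at ha h2
  have e1 : ('a').val.toNat = 97 := by decide
  have e2 : ('Z').val.toNat = 90 := by decide
  omega

lemma upper_not_lower {c : Char} (h : pvIsUpper c = true) : pvIsLower c = false := by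
  by_contra hb
  rw [Bool.not_eq_false] at hb
  rw [lower_not_upper hb] at h
  exact Bool.false_ne_true h

lemma remF_of_no (p : Char → Bool) (r : List Char) (h : r.countP p = 0) : remF p r = r := by
  induction r with
  | nil => rfl
  | cons a t ih =>
    rw [List.countP_cons] at h
    have hpa : p a = false := by by_contra hb; rw [Bool.not_eq_false] at hb; simp [hb] at h
    simp only [remF, hpa, Bool.false_eq_true, if_false, List.cons.injEq, true_and]
    exact ih (by omega)

lemma countP_remF_self (p : Char → Bool) (r : List Char) (h : r.countP p ≠ 0) :
    (remF p r).countP p = r.countP p - 1 := by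
  induction r with
  | nil => simp at h
  | cons a t ih =>
    cases hpa : p a with
    | true => simp [remF, hpa]
    | false =>
      rw [List.countP_cons, hpa] at h
      simp only [if_false, add_zero, Bool.false_eq_true] at h
      simp [remF, hpa, ih h]

lemma countP_remF_other (p q : Char → Bool) (hpq : ∀ a, p a = true → q a = false)
    (r : List Char) : (remF p r).countP q = r.countP q := by
  induction r with
  | nil => rfl
  | cons a t ih =>
    cases hpa : p a with
    | true => simp [remF, hpa, hpq a hpa]
    | false => simp [remF, hpa, List.countP_cons, ih]

lemma scan_some (p : Char → Bool) (r : List Char) (j : Int) (h : r.countP p ≠ 0) :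
    ∃ j', pvScanRemove p r j = some (remF p r, j') := by
  induction r generalizing j with
  | nil => simp at h
  | cons a t ih =>
    cases hpa : p a with
    | true => exact ⟨j, by simp [pvScanRemove, remF, hpa]⟩
    | false =>
      rw [List.countP_cons, hpa] at h
      simp only [if_false, add_zero, Bool.false_eq_true] at h
      obtain ⟨j', hj'⟩ := ih (j - 1) h
      exact ⟨j', by simp [pvScanRemove, remF, hpa, hj']⟩

-- A's fold tracks the model: ans is the reverse of the stepR-fold, small/cap are the counts
lemma A_loop (l : List Char) : ∀ (i : Int) (st : StA) (r : List Char),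
    st.ans = r.reverse → st.small = (r.countP pvIsLower : Int) → st.cap = (r.countP pvIsUpper : Int) →
    ((l.foldl (fun (p : Int × StA) c => (p.1 + 1, pvStepA p.2 p.1 c)) (i, st)).2).ans
      = (l.foldl stepR r).reverse := by
  induction l with
  | nil => intro i st r h1 _ _; simpa using h1
  | cons c l ih =>
    intro i st r h1 h2 h3
    rw [List.foldl_cons, List.foldl_cons]
    have hrev : st.ans.reverse = r := by rw [h1, List.reverse_reverse]
    by_cases hb : c = 'b'
    · subst hb
      by_cases h0 : st.small = 0
      · have hc0 : r.countP pvIsLower = 0 := by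
          rw [h0] at h2; exact_mod_cast h2.symm
        have : pvStepA st i 'b' = st := by simp [pvStepA, h0]
        rw [this]
        rw [show stepR r 'b' = r by simp [stepR, remF_of_no _ _ hc0]] at *
        exact ih _ st r h1 h2 h3
      · have hc0 : r.countP pvIsLower ≠ 0 := by
          intro hz; rw [hz] at h2; simp at h2; exact h0 h2
        obtain ⟨j', hj'⟩ := scan_some pvIsLower r (st.ans.length - 1) hc0
        have hstep : pvStepA st i 'b' =
            { st with ans := (remF pvIsLower r).reverse, small := st.small - 1,
                      ismall := (pvAdjust st.ismall j').dropLast,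
                      icap := (pvAdjust st.icap j').dropLast } := by
          unfold pvStepA
          rw [if_pos rfl, if_pos h0, hrev, hj']
        rw [hstep, show stepR r 'b' = remF pvIsLower r by simp [stepR]]
        refine ih _ _ _ rfl ?_ ?_
        · show st.small - 1 = _
          rw [h2, countP_remF_self _ _ hc0]
          have : 1 ≤ r.countP pvIsLower := Nat.one_le_iff_ne_zero.mpr hc0
          push_cast [Nat.cast_sub this]; ring
        · show st.cap = _
          rw [h3, countP_remF_other _ _ (fun a ha => lower_not_upper ha)]
    · by_cases hB : c = 'B'
      · subst hB
        by_cases h0 : st.cap = 0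
        · have hc0 : r.countP pvIsUpper = 0 := by
            rw [h0] at h3; exact_mod_cast h3.symm
          have : pvStepA st i 'B' = st := by simp [pvStepA, h0]
          rw [this]
          rw [show stepR r 'B' = r by simp [stepR, remF_of_no _ _ hc0]] at *
          exact ih _ st r h1 h2 h3
        · have hc0 : r.countP pvIsUpper ≠ 0 := by
            intro hz; rw [hz] at h3; simp at h3; exact h0 h3
          obtain ⟨j', hj'⟩ := scan_some pvIsUpper r (st.ans.length - 1) hc0
          have hstep : pvStepA st i 'B' =
              { st with ans := (remF pvIsUpper r).reverse, cap := st.cap - 1 } := by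
            unfold pvStepA
            rw [if_neg (by decide), if_pos rfl, if_pos h0, hrev, hj']
          rw [hstep, show stepR r 'B' = remF pvIsUpper r by simp [stepR]]
          refine ih _ _ _ rfl ?_ ?_
          · show st.small = _
            rw [h2, countP_remF_other _ _ (fun a ha => upper_not_lower ha)]
          · show st.cap - 1 = _
            rw [h3, countP_remF_self _ _ hc0]
            have : 1 ≤ r.countP pvIsUpper := Nat.one_le_iff_ne_zero.mpr hc0
            push_cast [Nat.cast_sub this]; ring
      · have hstep : pvStepA st i c =
            { ans := st.ans ++ [c],
              cap := st.cap + (if pvIsUpper c then 1 else 0),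
              small := st.small + (if pvIsLower c then 1 else 0),
              icap := st.icap ++ (if pvIsUpper c then [i] else []),
              ismall := st.ismall ++ (if pvIsLower c then [i] else []) } := by
          simp [pvStepA, hb, hB]
        rw [hstep, show stepR r c = c :: r by simp [stepR, hb, hB]]
        refine ih _ _ _ ?_ ?_ ?_
        · show st.ans ++ [c] = (c :: r).reverse
          rw [h1, List.reverse_cons]
        · show st.small + _ = _
          rw [h2, List.countP_cons]
          split_ifs with hl <;> simp
        · show st.cap + _ = _
          rw [h3, List.countP_cons]
          split_ifs with hu <;> simp

lemma remF_cons_of_neg (p : Char → Bool) {c : Char} (h : p c = false) (x : List Char) :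
    remF p (c :: x) = c :: remF p x := by simp [remF, h]

lemma iter_remF_cons (p : Char → Bool) {c : Char} (h : p c = false) (n : Nat) (x : List Char) :
    (remF p)^[n] (c :: x) = c :: (remF p)^[n] x := by
  induction n generalizing x with
  | zero => rfl
  | succ n ih => rw [Function.iterate_succ_apply, Function.iterate_succ_apply,
      remF_cons_of_neg p h, ih]

lemma remF_comm (x : List Char) :
    remF pvIsLower (remF pvIsUpper x) = remF pvIsUpper (remF pvIsLower x) := by
  induction x with
  | nil => rfl
  | cons a t ih =>
    cases hl : pvIsLower a with
    | true => simp [remF, hl, lower_not_upper hl]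
    | false =>
      cases hu : pvIsUpper a with
      | true => simp [remF, hl, hu]
      | false => simp [remF, hl, hu, ih]

lemma remF_iter_comm (n : Nat) (x : List Char) :
    remF pvIsLower ((remF pvIsUpper)^[n] x) = (remF pvIsUpper)^[n] (remF pvIsLower x) := by
  induction n generalizing x with
  | zero => rfl
  | succ n ih => rw [Function.iterate_succ_apply, Function.iterate_succ_apply, ih, remF_comm]

-- B's pass computes pl lowercase- and pu uppercase-deletions pending on the model result
lemma B_loop (r : List Char) : ∀ (pl pu : Nat),
    pvRunB r pl pu = (remF pvIsLower)^[pl] ((remF pvIsUpper)^[pu] (r.reverse.foldl stepR [])) := by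
  induction r with
  | nil =>
    intro pl pu
    have hU : (remF pvIsUpper)^[pu] ([] : List Char) = [] := Function.iterate_fixed rfl pu
    have hL : (remF pvIsLower)^[pl] ([] : List Char) = [] := Function.iterate_fixed rfl pl
    simp [pvRunB, hU, hL]
  | cons c t ih =>
    intro pl pu
    have hsplit : (c :: t).reverse.foldl stepR [] = stepR (t.reverse.foldl stepR []) c := by
      rw [List.reverse_cons, List.foldl_append, List.foldl_cons, List.foldl_nil]
    set x := t.reverse.foldl stepR [] with hx
    rw [hsplit]
    by_cases hb : c = 'b'
    · subst hb
      rw [show pvRunB ('b' :: t) pl pu = pvRunB t (pl + 1) pu from rfl, ih,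
        show stepR x 'b' = remF pvIsLower x by simp [stepR],
        Function.iterate_succ_apply, ← remF_iter_comm, ← Function.iterate_succ_apply,
        Function.iterate_succ_apply']
    · by_cases hB : c = 'B'
      · subst hB
        rw [show pvRunB ('B' :: t) pl pu = pvRunB t pl (pu + 1) by simp [pvRunB], ih,
          show stepR x 'B' = remF pvIsUpper x by simp [stepR], Function.iterate_succ_apply]
      · rw [show stepR x c = c :: x by simp [stepR, hb, hB]]
        cases hl : pvIsLower c with
        | true =>
          have hu : pvIsUpper c = false := lower_not_upper hl
          cases pl with
          | zero =>
            rw [show pvRunB (c :: t) 0 pu = c :: pvRunB t 0 pu by simp [pvRunB, hb, hB, hl, hu], ih]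
            simp [iter_remF_cons _ hu]
          | succ k =>
            rw [show pvRunB (c :: t) (k + 1) pu = pvRunB t k pu by simp [pvRunB, hb, hB, hl], ih,
              iter_remF_cons _ hu, Function.iterate_succ_apply,
              show remF pvIsLower (c :: (remF pvIsUpper)^[pu] x) = (remF pvIsUpper)^[pu] x
                by simp [remF, hl]]
        | false =>
          cases hu : pvIsUpper c with
          | true =>
            cases pu with
            | zero =>
              rw [show pvRunB (c :: t) pl 0 = c :: pvRunB t pl 0 by simp [pvRunB, hb, hB, hl, hu], ih]
              simp [iter_remF_cons _ hl]
            | succ k =>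
              rw [show pvRunB (c :: t) pl (k + 1) = pvRunB t pl k by simp [pvRunB, hb, hB, hl, hu], ih,
                Function.iterate_succ_apply,
                show remF pvIsUpper (c :: x) = x by simp [remF, hu]]
          | false =>
            rw [show pvRunB (c :: t) pl pu = c :: pvRunB t pl pu by simp [pvRunB, hb, hB, hl, hu], ih]
            simp [iter_remF_cons _ hu, iter_remF_cons _ hl]

-- ===== VERDICT (by name: the statement is the Claim_ definition above) =====
theorem f_spec : Claim_equal_f := by
  intro s _ _
  unfold Spec_f f f_alt
  rw [A_loop s.toList 0 ⟨[], 0, 0, [], []⟩ [] rfl rfl rfl, B_loop, List.reverse_reverse]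
  simp
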